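-- pv_equiv track=rewrite | github.com/beckspark/anki-connect-mcp | src/anki_connect_mcp/analyzers/performance.py | _calculate_maturity
-- ===== SOURCE A (Python) =====
-- def _calculate_maturity(cards: list[dict]) -> dict[str, int]:
--     """Calculate distribution by card maturity.
--
--     Maturity is based on interval:
--     - Young: < 21 days
--     - Mature: 21-90 days
--     - Very Mature: > 90 days
--
--     Args:
--         cards: List of card info dicts
--
--     Returns:
--         Dictionary with counts for each maturity level
--     """
--     breakdown = {"young": 0, "mature": 0, "very_mature": 0}
--
--     for card in cards:
--         interval = card.get("interval", 0)
--
--         if interval < 21: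
--             breakdown["young"] += 1
--         elif interval < 90:
--             breakdown["mature"] += 1
--         else:
--             breakdown["very_mature"] += 1
--
--     return breakdown
-- ===== SOURCE B (Python) =====
-- def _calculate_maturity(cards: list[dict]) -> dict[str, int]:
--     """Calculate distribution by card maturity (young < 21 <= mature < 90 <= very_mature)."""
--     young = sum(1 for card in cards if card.get("interval", 0) < 21)
--     mature = sum(1 for card in cards if 21 <= card.get("interval", 0) < 90)
--     return {"young": young, "mature": mature, "very_mature": len(cards) - young - mature}
-- ===== Notes on version B (the rewrite author's own statement) =====
-- stated objective: simpler
-- what changed: Replaces the mutable three-counter dict with per-item if/elif/else branching by two independent predicate counts (sum over a generator) and derives very_mature arithmetically as len(cards) - young - mature, building the result dict once as a literal.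
import Mathlib
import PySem

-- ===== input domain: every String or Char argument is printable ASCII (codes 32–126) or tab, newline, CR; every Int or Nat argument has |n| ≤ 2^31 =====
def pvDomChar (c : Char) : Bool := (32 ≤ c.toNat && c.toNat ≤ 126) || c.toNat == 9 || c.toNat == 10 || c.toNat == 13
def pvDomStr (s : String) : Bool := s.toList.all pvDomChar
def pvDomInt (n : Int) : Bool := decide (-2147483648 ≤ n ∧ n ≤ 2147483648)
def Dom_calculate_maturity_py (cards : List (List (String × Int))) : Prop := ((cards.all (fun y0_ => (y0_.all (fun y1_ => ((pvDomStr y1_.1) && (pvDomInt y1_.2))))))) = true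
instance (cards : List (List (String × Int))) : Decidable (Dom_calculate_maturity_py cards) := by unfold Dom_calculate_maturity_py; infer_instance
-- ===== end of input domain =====

-- B replaces A's mutable three-counter dict with per-item if/elif/else branching by two
-- independent predicate counts, deriving very_mature by subtraction (objective: simpler).

-- ===== PORT A =====
def calculate_maturity_py (cards : List (List (String × Int))) : List (String × Int) :=
  let breakdown : PySem.Dict String Int :=
    ((PySem.Dict.empty.insert "young" 0).insert "mature" 0).insert "very_mature" 0
  (cards.foldl (fun b card =>
      let interval := (PySem.Dict.mk card).getD "interval" 0
      if interval < 21 then b.modify "young" 0 (· + 1)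
      else if interval < 90 then b.modify "mature" 0 (· + 1)
      else b.modify "very_mature" 0 (· + 1)) breakdown).items

-- ===== PORT B =====
def calculate_maturity_py_alt (cards : List (List (String × Int))) : List (String × Int) :=
  let young : Int := cards.countP (fun card => (PySem.Dict.mk card).getD "interval" 0 < 21)
  let mature : Int := cards.countP (fun card =>
      21 ≤ (PySem.Dict.mk card).getD "interval" 0 && (PySem.Dict.mk card).getD "interval" 0 < 90)
  [("young", young), ("mature", mature), ("very_mature", (cards.length : Int) - young - mature)]

-- ===== PRECONDITION & SPEC =====
def Spec_calculate_maturity_py (cards : List (List (String × Int))) (out : List (String × Int)) : Prop := out = calculate_maturity_py_alt cards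
instance (cards : List (List (String × Int))) (out : List (String × Int)) : Decidable (Spec_calculate_maturity_py cards out) := by unfold Spec_calculate_maturity_py; infer_instance

-- ===== CLAIM (what is proved, stated in full; the proofs are below) =====
def Claim_equal_calculate_maturity_py : Prop := ∀ (cards : List (List (String × Int))), Dom_calculate_maturity_py cards → Spec_calculate_maturity_py cards (calculate_maturity_py cards)

-- ===== LEMMAS AND PROOFS =====

-- the three dict-update steps of A's loop, on the literal 3-key dict
theorem pv_mod_young (y m v : Int) :
    (PySem.Dict.mk [("young", y), ("mature", m), ("very_mature", v)]).modify "young" 0 (· + 1)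
    = PySem.Dict.mk [("young", y + 1), ("mature", m), ("very_mature", v)] := rfl
theorem pv_mod_mature (y m v : Int) :
    (PySem.Dict.mk [("young", y), ("mature", m), ("very_mature", v)]).modify "mature" 0 (· + 1)
    = PySem.Dict.mk [("young", y), ("mature", m + 1), ("very_mature", v)] := rfl
theorem pv_mod_very (y m v : Int) :
    (PySem.Dict.mk [("young", y), ("mature", m), ("very_mature", v)]).modify "very_mature" 0 (· + 1)
    = PySem.Dict.mk [("young", y), ("mature", m), ("very_mature", v + 1)] := rfl

-- loop invariant for A's fold, starting from an arbitrary 3-key literal dict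
theorem pv_loop (cards : List (List (String × Int))) (y m v : Int) :
    (cards.foldl (fun b card =>
      if (PySem.Dict.mk card).getD "interval" 0 < 21 then b.modify "young" 0 (· + 1)
      else if (PySem.Dict.mk card).getD "interval" 0 < 90 then b.modify "mature" 0 (· + 1)
      else b.modify "very_mature" 0 (· + 1))
      (PySem.Dict.mk [("young", y), ("mature", m), ("very_mature", v)])).items
    = [("young", y + cards.countP (fun card => (PySem.Dict.mk card).getD "interval" 0 < 21)),
       ("mature", m + cards.countP (fun card =>
          21 ≤ (PySem.Dict.mk card).getD "interval" 0 && (PySem.Dict.mk card).getD "interval" 0 < 90)),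
       ("very_mature", v + cards.countP (fun card => 90 ≤ (PySem.Dict.mk card).getD "interval" 0))] := by
  induction cards generalizing y m v with
  | nil => simp
  | cons c rest ih =>
    simp only [List.foldl_cons, List.countP_cons]
    by_cases h1 : (PySem.Dict.mk c).getD "interval" 0 < 21
    · rw [if_pos h1, pv_mod_young, ih]
      have h2 : ((decide (21 ≤ (PySem.Dict.mk c).getD "interval" 0)) && (decide ((PySem.Dict.mk c).getD "interval" 0 < 90))) = false := by
        simp only [Bool.and_eq_false_iff, decide_eq_false_iff_not]; left; omega
      have h3 : ¬ (90 ≤ (PySem.Dict.mk c).getD "interval" 0) := by omega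
      simp [h1, h2, h3]; omega
    · by_cases h2 : (PySem.Dict.mk c).getD "interval" 0 < 90
      · rw [if_neg h1, if_pos h2, pv_mod_mature, ih]
        have hm : ((decide (21 ≤ (PySem.Dict.mk c).getD "interval" 0)) && (decide ((PySem.Dict.mk c).getD "interval" 0 < 90))) = true := by
          simp only [Bool.and_eq_true, decide_eq_true_eq]; omega
        have h3 : ¬ (90 ≤ (PySem.Dict.mk c).getD "interval" 0) := by omega
        simp [h1, hm, h3]; omega
      · rw [if_neg h1, if_neg h2, pv_mod_very, ih]
        have h3 : (90 ≤ (PySem.Dict.mk c).getD "interval" 0) := by omega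
        simp [h1, h2, h3]; omega

-- the three buckets partition the list
theorem pv_partition (cards : List (List (String × Int))) :
    cards.countP (fun card => (PySem.Dict.mk card).getD "interval" 0 < 21)
    + cards.countP (fun card =>
        21 ≤ (PySem.Dict.mk card).getD "interval" 0 && (PySem.Dict.mk card).getD "interval" 0 < 90)
    + cards.countP (fun card => 90 ≤ (PySem.Dict.mk card).getD "interval" 0)
    = cards.length := by
  induction cards with
  | nil => simp
  | cons c rest ih =>
    simp only [List.countP_cons, List.length_cons]
    by_cases h1 : (PySem.Dict.mk c).getD "interval" 0 < 21
    · have h2 : ((decide (21 ≤ (PySem.Dict.mk c).getD "interval" 0)) && (decide ((PySem.Dict.mk c).getD "interval" 0 < 90))) = false := by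
        simp only [Bool.and_eq_false_iff, decide_eq_false_iff_not]; left; omega
      have h3 : ¬ (90 ≤ (PySem.Dict.mk c).getD "interval" 0) := by omega
      simp [h1, h2, h3]; omega
    · by_cases h2 : (PySem.Dict.mk c).getD "interval" 0 < 90
      · have hm : ((decide (21 ≤ (PySem.Dict.mk c).getD "interval" 0)) && (decide ((PySem.Dict.mk c).getD "interval" 0 < 90))) = true := by
          simp only [Bool.and_eq_true, decide_eq_true_eq]; omega
        have h3 : ¬ (90 ≤ (PySem.Dict.mk c).getD "interval" 0) := by omega
        simp [h1, hm, h3]; omega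
      · have hm : ((decide (21 ≤ (PySem.Dict.mk c).getD "interval" 0)) && (decide ((PySem.Dict.mk c).getD "interval" 0 < 90))) = false := by
          simp only [Bool.and_eq_false_iff, decide_eq_false_iff_not]; right; omega
        have h3 : (90 ≤ (PySem.Dict.mk c).getD "interval" 0) := by omega
        simp [h1, h2, h3]; omega

-- ===== VERDICT (by name: the statement is the Claim_ definition above) =====
theorem calculate_maturity_py_spec : Claim_equal_calculate_maturity_py := by
  intro cards _
  unfold Spec_calculate_maturity_py
  simp only [calculate_maturity_py, calculate_maturity_py_alt]
  rw [show ((PySem.Dict.empty.insert "young" (0:Int)).insert "mature" 0).insert "very_mature" 0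
        = PySem.Dict.mk [("young", 0), ("mature", 0), ("very_mature", 0)] from rfl, pv_loop]
  have := pv_partition cards
  simp only [zero_add, List.cons.injEq, Prod.mk.injEq, and_true, true_and]
  omega
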